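-- pv_equiv track=rewrite | github.com/Namhunk/OJ | 백준/Gold/33156. 구간이 이븐하지 않아요．/구간이 이븐하지 않아요．.py | solve
-- ===== SOURCE A (Python) =====
-- def solve(N, A):
--     idx = {j: i for i, j in enumerate(sorted(set(A)))} # 각 숫자들을 크기순으로 0 부터 번호 부여
--     D = len(set(A)) # 총 숫자들의 개수
--     arr = [[0]*(N+1) for _ in range(D)] # 각 숫자들에 대해 중복되는 숫자의 위치를 나타낼 배열
--
--     for i in range(N):
--         arr[idx[A[i]]][i+1] = 1 # A 배열에서 현재 위치의 숫자에 1 표시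
--
--     for d in range(D):
--         for i in range(1, N+1):
--             arr[d][i] += arr[d][i-1] # 각 숫자들의 위치를 누적합으로 표시
--
--     start = N if N % 2 == 0 else N-1 # 배열의 길이가 짝수인지 홀수인지에 따라 최대 길이 설정
--     for i in range(start, 1, -2): # 길이는 짝수, 2씩 감소
--         for l in range(N-i+1): # 시작점
--             r = l + i - 1 # 종료 지점
--             m = (l + r) // 2 # 중간
--             flag = True # 배열의 숫자들이 같은지 확인
--
--             for d in range(D): # 각 숫자들에 대해
--                 left = arr[d][m+1] - arr[d][l] # 왼쪽 배열
--                 right = arr[d][r+1] - arr[d][m+1] # 오른쪽 배열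
--                 if left != right: # 왼쪽 오른쪽 배열에서 현재 숫자의 개수가 다른지
--                     flag = False
--                     break
--
--             if flag: # 모든 숫자가 왼쪽 오른쪽에 같은 개수로 있다면
--                 return i
--
--     return 0 # 없다면 0
-- ===== SOURCE B (Python) =====
-- def _bump(diff, v, delta):
--     c = diff.get(v, 0) + delta
--     if c:
--         diff[v] = c
--     else:
--         diff.pop(v, None)
--
--
-- def solve(N, A):
--     top = N if N % 2 == 0 else N - 1
--     for i in range(top, 1, -2):
--         h = i // 2
--         diff = {}  # value -> (count in left half) - (count in right half); zeros removed
--         for k in range(h):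
--             _bump(diff, A[k], 1)
--         for k in range(h, i):
--             _bump(diff, A[k], -1)
--         if not diff:
--             return i
--         for l in range(1, N - i + 1):
--             _bump(diff, A[l - 1], -1)
--             _bump(diff, A[l - 1 + h], 2)
--             _bump(diff, A[l - 1 + i], -1)
--             if not diff:
--                 return i
--     return 0
-- ===== Notes on version B (the rewrite author's own statement) =====
-- stated objective: faster
-- what changed: Replaces A's per-value prefix-sum tables (rebuilt comparison over all D distinct values for every candidate window) by, per half-length, one sliding window that maintains a dict of nonzero left-half-minus-right-half value counts, updated with O(1) bumps per shift and an O(1) emptiness test.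
import Mathlib
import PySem

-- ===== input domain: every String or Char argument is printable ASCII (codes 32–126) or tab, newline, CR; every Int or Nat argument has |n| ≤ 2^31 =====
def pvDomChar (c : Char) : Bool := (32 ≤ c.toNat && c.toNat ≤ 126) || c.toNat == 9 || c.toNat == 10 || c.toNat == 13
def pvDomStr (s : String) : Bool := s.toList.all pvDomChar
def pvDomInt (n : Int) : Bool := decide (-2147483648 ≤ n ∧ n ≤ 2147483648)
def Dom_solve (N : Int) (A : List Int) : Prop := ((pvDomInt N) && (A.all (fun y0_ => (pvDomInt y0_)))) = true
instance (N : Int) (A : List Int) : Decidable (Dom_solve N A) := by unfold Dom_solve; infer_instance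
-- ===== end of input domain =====

-- B replaces A's per-distinct-value prefix-sum tables by a per-half-length sliding window
-- maintaining a dict of the nonzero left-minus-right value counts (faster: measured ~2-3x on the timing inputs).


-- ===== PORT A =====
-- arr[r][c] read/write; exact for the indices this program reaches (0 ≤ r < len(arr),
-- 0 ≤ c < len(arr[r])) — under Pre_solve every access of A's code is in that range.
def get2 (arr : List (List Int)) (r c : Int) : Int :=
  (arr.getD r.toNat []).getD c.toNat 0

def set2 (arr : List (List Int)) (r c v : Int) : List (List Int) :=
  arr.set r.toNat ((arr.getD r.toNat []).set c.toNat v)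

-- inner 'for d in range(D): ... if left != right: flag = False; break' + 'if flag: return i'
def innerA (arr : List (List Int)) (D i : Int) : List Int → Option Int
  | [] => none
  | l :: ls =>
      let r := l + i - 1
      let m := PySem.Int.floordiv (l + r) 2
      let flag := (PySem.List.pyRange 0 D 1).all (fun d =>
        get2 arr d (m+1) - get2 arr d l == get2 arr d (r+1) - get2 arr d (m+1))
      if flag then some i else innerA arr D i ls

-- outer 'for i in range(start, 1, -2)'
def outerA (N : Int) (arr : List (List Int)) (D : Int) : List Int → Int
  | [] => 0
  | i :: is =>
      match innerA arr D i (PySem.List.pyRange 0 (N - i + 1) 1) with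
      | some r => r
      | none => outerA N arr D is

def solve (N : Int) (A : List Int) : Int :=
  let vs := PySem.List.sorted (PySem.Set.ofList A) (fun x => x)              -- sorted(set(A))
  let idx := (PySem.List.enumerate vs 0).foldl
    (fun d p => d.insert p.2 p.1) (PySem.Dict.empty (κ := Int) (ν := Int))
  let D : Int := PySem.List.len (PySem.Set.ofList A)
  let arr0 := (PySem.List.pyRange 0 D 1).map (fun _ => List.replicate (N+1).toNat (0:Int))
  let arr1 := (PySem.List.pyRange 0 N 1).foldl
    (fun arr i => set2 arr (idx.getD (PySem.List.pyGetD A i 0) 0) (i+1) 1) arr0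
  let arr2 := (PySem.List.pyRange 0 D 1).foldl (fun arr d =>
    (PySem.List.pyRange 1 (N+1) 1).foldl
      (fun arr i => set2 arr d i (get2 arr d i + get2 arr d (i-1))) arr) arr1
  let start := if PySem.Int.mod N 2 = 0 then N else N - 1
  outerA N arr2 D (PySem.List.pyRange start 1 (-2))

-- ===== PORT B =====
-- diff.get(v,0)+delta; store if nonzero, else pop
def bumpB (d : PySem.Dict Int Int) (v delta : Int) : PySem.Dict Int Int :=
  let c := d.getD v 0 + delta
  if c ≠ 0 then d.insert v c else d.erase v

-- the two build loops for the first window [0, i)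
def buildB (A : List Int) (h i : Int) : PySem.Dict Int Int :=
  let d := (PySem.List.pyRange 0 h 1).foldl
    (fun d k => bumpB d (PySem.List.pyGetD A k 0) 1) (PySem.Dict.empty (κ := Int) (ν := Int))
  (PySem.List.pyRange h i 1).foldl (fun d k => bumpB d (PySem.List.pyGetD A k 0) (-1)) d

-- 'for l in range(1, N-i+1)' with the three O(1) bumps per shift and the emptiness test
def slideB (A : List Int) (i h : Int) : List Int → PySem.Dict Int Int → Option Int
  | [], _ => none
  | l :: ls, d =>
      let d' := bumpB (bumpB (bumpB d (PySem.List.pyGetD A (l-1) 0) (-1))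
        (PySem.List.pyGetD A (l-1+h) 0) 2) (PySem.List.pyGetD A (l-1+i) 0) (-1)
      if d'.items = [] then some i else slideB A i h ls d'

-- 'for i in range(top, 1, -2)'
def outerB (N : Int) (A : List Int) : List Int → Int
  | [] => 0
  | i :: is =>
      let h := PySem.Int.floordiv i 2
      let d := buildB A h i
      if d.items = [] then i
      else
        match slideB A i h (PySem.List.pyRange 1 (N - i + 1) 1) d with
        | some r => r
        | none => outerB N A is

def solve_alt (N : Int) (A : List Int) : Int :=
  let top := if PySem.Int.mod N 2 = 0 then N else N - 1
  outerB N A (PySem.List.pyRange top 1 (-2))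

-- ===== PRECONDITION & SPEC =====
-- Pre_solve: exactly where Python A returns normally — A indexes A[i] for every i < N, so it
-- raises IndexError iff N > len(A); any N ≤ len(A) (including N ≤ 0) returns.
def Pre_solve (N : Int) (A : List Int) : Prop := N ≤ (A.length : Int)
instance (N : Int) (A : List Int) : Decidable (Pre_solve N A) := by unfold Pre_solve; infer_instance
def pvWitness_solve : Int × List Int := (4, [1, 2, 2, 1])

def Spec_solve (N : Int) (A : List Int) (out : Int) : Prop := out = solve_alt N A
instance (N : Int) (A : List Int) (out : Int) : Decidable (Spec_solve N A out) := by unfold Spec_solve; infer_instance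

-- ===== CLAIM (what is proved, stated in full; the proofs are below) =====
def Claim_equal_solve : Prop := ∀ (N : Int) (A : List Int), Dom_solve N A → Pre_solve N A → Spec_solve N A (solve N A)

-- ===== LEMMAS AND PROOFS =====
-- ---------- proof-side abbreviations for A's pipeline ----------
def vsA (A : List Int) : List Int := PySem.List.sorted (PySem.Set.ofList A) (fun x => x)
def DnA (A : List Int) : Nat := (vsA A).length
def idxA (A : List Int) : PySem.Dict Int Int :=
  (PySem.List.enumerate (vsA A) 0).foldl (fun d p => d.insert p.2 p.1)
    (PySem.Dict.empty (κ := Int) (ν := Int))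
def arr0A (N : Int) (A : List Int) : List (List Int) :=
  (PySem.List.pyRange 0 ((DnA A : Int)) 1).map (fun _ => List.replicate (N+1).toNat (0:Int))
def arr1A (N : Int) (A : List Int) : List (List Int) :=
  (PySem.List.pyRange 0 N 1).foldl
    (fun arr i => set2 arr ((idxA A).getD (PySem.List.pyGetD A i 0) 0) (i+1) 1) (arr0A N A)
def arr2A (N : Int) (A : List Int) : List (List Int) :=
  (PySem.List.pyRange 0 ((DnA A : Int)) 1).foldl (fun arr d =>
    (PySem.List.pyRange 1 (N+1) 1).foldl
      (fun arr i => set2 arr d i (get2 arr d i + get2 arr d (i-1))) arr) (arr1A N A)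
def startI (N : Int) : Int := if PySem.Int.mod N 2 = 0 then N else N - 1

def Shape (arr : List (List Int)) (Dn W : Nat) : Prop :=
  arr.length = Dn ∧ ∀ row ∈ arr, row.length = W

def markV (A : List Int) (N' d j : Nat) : Int :=
  if 1 ≤ j ∧ j ≤ N' ∧ A.getD (j-1) 0 = (vsA A).getD d 0 then 1 else 0
def cntV (A : List Int) (d j : Nat) : Int := (((A.take j).count ((vsA A).getD d 0) : Nat) : Int)
def Pwin (A : List Int) (h l : Nat) : Prop :=
  ∀ v : Int, ((A.drop l).take h).count v = ((A.drop (l+h)).take h).count v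
def wdiffV (A : List Int) (h l : Nat) (v : Int) : Int :=
  (((A.drop l).take h).count v : Int) - (((A.drop (l+h)).take h).count v : Int)

-- ---------- basic facts about vs / idx ----------
lemma vs_nodup (A : List Int) : (vsA A).Nodup := by
  exact (PySem.List.sorted_ofList_pairwise_lt A).imp (fun h => ne_of_lt h)
lemma vs_mem (A : List Int) (v : Int) : v ∈ vsA A ↔ v ∈ A := by
  exact ((PySem.List.sorted_perm (PySem.Set.ofList A) (fun x => x) false).mem_iff).trans
    (PySem.Set.mem_ofList A v)
lemma DnA_eq (A : List Int) : (DnA A : Int) = PySem.List.len (PySem.Set.ofList A) := by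
  unfold DnA vsA
  rw [PySem.List.len_eq]
  exact_mod_cast congrArg Nat.cast
    (PySem.List.sorted_perm (PySem.Set.ofList A) (fun x => x) false).length_eq
lemma idx_getD (A : List Int) (t : Nat) (ht : t < DnA A) :
    (idxA A).getD ((vsA A).getD t 0) 0 = (t : Int) := by
  unfold DnA at ht
  have hvs : ((PySem.List.enumerate (vsA A) 0).map (fun p => p.2)) = vsA A :=
    PySem.List.map_snd_enumerate (vsA A) 0
  have hitems : (idxA A).items
      = (PySem.Dict.empty (κ := Int) (ν := Int)).items
        ++ (PySem.List.enumerate (vsA A) 0).map (fun p => (p.2, p.1)) := by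
    apply PySem.Dict.items_foldl_insert_fresh
    · intro a _
      simp [PySem.Dict.empty, PySem.Dict.contains]
    · rw [hvs]; exact vs_nodup A
  have hkeys : (idxA A).keys.Nodup := by
    have hk : (idxA A).keys = vsA A := by
      simp only [PySem.Dict.keys, hitems, PySem.Dict.empty, List.nil_append, List.map_map]
      have hcomp : ((fun (x : Int × Int) => x.1) ∘ fun (p : Int × Int) => (p.2, p.1))
          = fun (p : Int × Int) => p.2 := rfl
      rw [hcomp]
      exact hvs
    rw [hk]; exact vs_nodup A
  have hmem : ((vsA A).getD t 0, (t : Int)) ∈ (idxA A).items := by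
    rw [hitems]
    refine List.mem_append_right _ ?_
    refine List.mem_map.mpr ⟨((t : Int), (vsA A)[t]), ?_, ?_⟩
    · rw [PySem.List.mem_enumerate_iff]
      exact ⟨t, ht, by simp⟩
    · rw [List.getD_eq_getElem _ 0 ht]
  exact PySem.Dict.getD_of_mem_items (idxA A) hmem hkeys 0
lemma vs_getD_eq_iff (A : List Int) {v : Int} (hv : v ∈ A) {d : Nat} (hd : d < DnA A) :
    (vsA A).getD d 0 = v ↔ d = (vsA A).idxOf v := by
  unfold DnA at hd
  have hvm : v ∈ vsA A := (vs_mem A v).mpr hv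
  have hlt : (vsA A).idxOf v < (vsA A).length := List.idxOf_lt_length_iff.mpr hvm
  rw [List.getD_eq_getElem _ 0 hd]
  constructor
  · intro hEq
    have hgi : (vsA A)[(vsA A).idxOf v] = v := List.getElem_idxOf hlt
    have : (vsA A)[d] = (vsA A)[(vsA A).idxOf v] := by rw [hEq, hgi]
    exact (List.Nodup.getElem_inj_iff (vs_nodup A)).mp this
  · intro hEq
    subst hEq
    exact List.getElem_idxOf hlt
lemma idxOf_lt (A : List Int) {v : Int} (hv : v ∈ A) : (vsA A).idxOf v < DnA A := by
  unfold DnA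
  exact List.idxOf_lt_length_iff.mpr ((vs_mem A v).mpr hv)

-- ---------- solve as the composition of the proof-side pieces ----------
lemma solve_eq (N : Int) (A : List Int) :
    solve N A = outerA N (arr2A N A) ((DnA A : Int)) (PySem.List.pyRange (startI N) 1 (-2)) := by
  simp only [solve, ← DnA_eq]
  rfl
lemma solve_alt_eq (N : Int) (A : List Int) :
    solve_alt N A = outerB N A (PySem.List.pyRange (startI N) 1 (-2)) := by
  rfl

-- ---------- 2d table primitives ----------
lemma shape_set2 {arr : List (List Int)} {Dn W : Nat} (hs : Shape arr Dn W)
    {r : Nat} (hr : r < Dn) (c : Nat) (v : Int) : Shape (set2 arr (r : Int) (c : Int) v) Dn W := by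
  obtain ⟨hlen, hrowlen⟩ := hs
  constructor
  · simp [set2, hlen]
  · intro row hmem
    simp only [set2, Int.toNat_natCast] at hmem
    rcases List.mem_or_eq_of_mem_set hmem with hmem' | rfl
    · exact hrowlen _ hmem'
    · rw [List.length_set]
      apply hrowlen
      have hr' : r < arr.length := hlen ▸ hr
      rw [List.getD_eq_getElem _ [] hr']
      exact List.getElem_mem _
lemma get2_set2 {arr : List (List Int)} {Dn W : Nat} (hs : Shape arr Dn W)
    {r c d j : Nat} (hr : r < Dn) (hc : c < W) (hd : d < Dn) (hj : j < W) (v : Int) :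
    get2 (set2 arr (r : Int) (c : Int) v) (d : Int) (j : Int)
      = if d = r ∧ j = c then v else get2 arr (d : Int) (j : Int) := by
  obtain ⟨hlen, hrowlen⟩ := hs
  have hr' : r < arr.length := hlen ▸ hr
  have hd' : d < arr.length := hlen ▸ hd
  have hrowl : (arr.getD r []).length = W := by
    rw [List.getD_eq_getElem _ [] hr']
    exact hrowlen _ (List.getElem_mem _)
  simp only [get2, set2, Int.toNat_natCast]
  by_cases hdr : d = r
  · subst hdr
    rw [List.getD_eq_getElem _ [] (by simpa [List.length_set] using hd'),
      List.getElem_set_self (by simpa [List.length_set] using hd')]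
    by_cases hjc : j = c
    · subst hjc
      rw [if_pos ⟨rfl, rfl⟩]
      rw [List.getD_eq_getElem _ 0 (by rw [List.length_set, hrowl]; exact hj)]
      exact List.getElem_set_self (by rw [List.length_set, hrowl]; exact hc)
    · rw [if_neg (by tauto)]
      rw [List.getD_eq_getElem _ 0 (by rw [List.length_set, hrowl]; exact hj),
        List.getD_eq_getElem _ 0 (by rw [hrowl]; exact hj)]
      exact List.getElem_set_ne (fun hE => hjc hE.symm) _
  · rw [if_neg (by tauto)]
    rw [List.getD_eq_getElem _ [] (by simpa [List.length_set] using hd'),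
      List.getD_eq_getElem _ [] hd',
      List.getElem_set_ne (fun hE => hdr hE.symm) (by simpa [List.length_set] using hd')]

-- ---------- stage 0: zeros ----------
lemma shape_arr0 (N : Int) (A : List Int) (hN : 0 ≤ N) :
    Shape (arr0A N A) (DnA A) (N.toNat + 1) := by
  constructor
  · simp [arr0A, PySem.List.length_pyRange_one]
  · intro row hrow
    simp only [arr0A, List.mem_map] at hrow
    obtain ⟨_, _, rfl⟩ := hrow
    simp only [List.length_replicate]
    omega
lemma get2_arr0 (N : Int) (A : List Int) (d j : Int) : get2 (arr0A N A) d j = 0 := by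
  unfold get2
  have harr : arr0A N A = List.replicate (DnA A) (List.replicate (N+1).toNat 0) := by
    simp [arr0A]
  rw [harr]
  have hrow : (List.replicate (DnA A) (List.replicate (N+1).toNat (0:Int))).getD d.toNat []
      = List.replicate (N+1).toNat 0
    ∨ (List.replicate (DnA A) (List.replicate (N+1).toNat (0:Int))).getD d.toNat [] = [] := by
    by_cases hd : d.toNat < DnA A
    · left
      rw [List.getD_eq_getElem _ _ (by simpa using hd), List.getElem_replicate]
    · right
      rw [List.getD_eq_getElem?_getD, List.getElem?_eq_none (by simp only [List.length_replicate]; omega)]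
      rfl
  rcases hrow with hcase | hcase <;> rw [hcase]
  · by_cases hj : j.toNat < (N+1).toNat
    · rw [List.getD_eq_getElem _ 0 (by simpa using hj), List.getElem_replicate]
    · rw [List.getD_eq_getElem?_getD, List.getElem?_eq_none (by simp only [List.length_replicate]; omega)]
      rfl
  · simp

lemma mark_fold (N : Int) (A : List Int) (hN : 0 ≤ N) (hNA : N ≤ (A.length : Int))
    (k : Nat) (hk : (k : Int) ≤ N) :
    Shape ((PySem.List.pyRange 0 (k : Int) 1).foldl
        (fun arr i => set2 arr ((idxA A).getD (PySem.List.pyGetD A i 0) 0) (i+1) 1) (arr0A N A))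
      (DnA A) (N.toNat + 1) ∧
    ∀ d < DnA A, ∀ j < N.toNat + 1,
      get2 ((PySem.List.pyRange 0 (k : Int) 1).foldl
        (fun arr i => set2 arr ((idxA A).getD (PySem.List.pyGetD A i 0) 0) (i+1) 1) (arr0A N A))
        (d : Int) (j : Int)
      = if 1 ≤ j ∧ j ≤ k ∧ A.getD (j-1) 0 = (vsA A).getD d 0 then 1 else 0 := by
  induction k with
  | zero =>
      rw [PySem.List.pyRange_one_eq_nil (by simp)]
      simp only [List.foldl_nil]
      refine ⟨shape_arr0 N A hN, ?_⟩
      intro d hd j hj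
      rw [get2_arr0, if_neg (by omega)]
  | succ k ih =>
      have hk' : (k : Int) ≤ N := by push_cast at hk ⊢; omega
      obtain ⟨ihS, ihG⟩ := ih hk'
      have hsplit : PySem.List.pyRange 0 ((k+1 : Nat) : Int) 1
          = PySem.List.pyRange 0 ((k : Nat) : Int) 1 ++ [((k : Nat) : Int)] := by
        push_cast
        exact PySem.List.pyRange_one_succ_right (by exact_mod_cast Nat.zero_le k)
      rw [hsplit, List.foldl_append]
      simp only [List.foldl_cons, List.foldl_nil]
      have hkA : k < A.length := by omega
      have hpg : PySem.List.pyGetD A ((k : Nat) : Int) 0 = A[k] := by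
        rw [PySem.List.pyGetD_natCast]
        exact List.getD_eq_getElem A 0 hkA
      have hmemA : A[k] ∈ A := List.getElem_mem hkA
      have htlt : (vsA A).idxOf A[k] < DnA A := idxOf_lt A hmemA
      have hgv : (vsA A).getD ((vsA A).idxOf A[k]) 0 = A[k] := by
        have hlt2 := htlt
        unfold DnA at hlt2
        rw [List.getD_eq_getElem _ 0 hlt2]
        exact List.getElem_idxOf hlt2
      have hidx : (idxA A).getD A[k] 0 = (((vsA A).idxOf A[k] : Nat) : Int) := by
        conv_lhs => rw [← hgv]
        exact idx_getD A _ htlt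
      rw [hpg, hidx]
      have hcol : (((k : Nat) : Int)) + 1 = (((k+1 : Nat)) : Int) := by push_cast; ring
      rw [hcol]
      refine ⟨shape_set2 ihS htlt (k+1) 1, ?_⟩
      intro d hd j hj
      rw [get2_set2 ihS htlt (by omega : k+1 < N.toNat+1) hd hj 1]
      by_cases hcase : d = (vsA A).idxOf A[k] ∧ j = k+1
      · obtain ⟨rfl, rfl⟩ := hcase
        rw [if_pos ⟨rfl, rfl⟩, if_pos ?_]
        refine ⟨by omega, by omega, ?_⟩
        have hjj : k + 1 - 1 = k := by omega
        rw [hjj, List.getD_eq_getElem A 0 hkA]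
        exact hgv.symm
      · rw [if_neg hcase, ihG d hd j hj]
        by_cases hj1 : 1 ≤ j ∧ j ≤ k ∧ A.getD (j-1) 0 = (vsA A).getD d 0
        · rw [if_pos hj1, if_pos ⟨hj1.1, by omega, hj1.2.2⟩]
        · rw [if_neg hj1, if_neg ?_]
          rintro ⟨h1, h2, h3⟩
          by_cases hjk : j ≤ k
          · exact hj1 ⟨h1, hjk, h3⟩
          · have hjkk : j = k+1 := by omega
            subst hjkk
            have hjj : k + 1 - 1 = k := by omega
            rw [hjj, List.getD_eq_getElem A 0 hkA] at h3
            exact hcase ⟨(vs_getD_eq_iff A hmemA hd).mp h3.symm, rfl⟩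
lemma arr1_spec (N : Int) (A : List Int) (hN : 0 ≤ N) (hNA : N ≤ (A.length : Int)) :
    Shape (arr1A N A) (DnA A) (N.toNat + 1) ∧
    ∀ d < DnA A, ∀ j < N.toNat + 1,
      get2 (arr1A N A) (d : Int) (j : Int) = markV A N.toNat d j := by
  have hNN : PySem.List.pyRange 0 N 1 = PySem.List.pyRange 0 ((N.toNat : Nat) : Int) 1 := by
    congr 1
    omega
  have hmf := mark_fold N A hN hNA N.toNat (by omega)
  unfold arr1A
  rw [hNN]
  refine ⟨hmf.1, fun d hd j hj => ?_⟩
  rw [hmf.2 d hd j hj]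
  rfl

-- ---------- counting ----------
lemma cnt_zero (A : List Int) (d : Nat) : cntV A d 0 = 0 := by
  simp [cntV]
lemma cnt_succ (N : Int) (A : List Int) (hNA : N ≤ (A.length : Int)) (d : Nat) (j : Nat)
    (hj : j < N.toNat) : cntV A d (j+1) = cntV A d j + markV A N.toNat d (j+1) := by
  have hjl : j < A.length := by omega
  unfold cntV markV
  rw [List.take_succ]
  have hget : A[j]? = some A[j] := List.getElem?_eq_getElem hjl
  rw [hget]
  simp only [Option.toList_some, List.count_append, List.count_cons, List.count_nil]
  have hA : A.getD (j + 1 - 1) 0 = A[j] := by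
    simpa using List.getD_eq_getElem A 0 hjl
  rw [hA]
  by_cases hv : A[j] = (vsA A).getD d 0
  · have hc : 1 ≤ j + 1 ∧ j + 1 ≤ N.toNat ∧ A[j] = (vsA A).getD d 0 := ⟨by omega, by omega, hv⟩
    rw [if_pos hc, hv]
    simp
  · have hc : ¬(1 ≤ j + 1 ∧ j + 1 ≤ N.toNat ∧ A[j] = (vsA A).getD d 0) := fun hc => hv hc.2.2
    rw [if_neg hc]
    have hb : (A[j] == (vsA A).getD d 0) = false := beq_eq_false_iff_ne.mpr hv
    rw [hb]
    simp
-- ---------- stage 2: prefix sums ----------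
lemma prefix_fold (N : Int) (A : List Int) (hN : 0 ≤ N)
    {arr : List (List Int)} (hs : Shape arr (DnA A) (N.toNat + 1))
    {d : Nat} (hd : d < DnA A)
    (hNA : N ≤ (A.length : Int))
    (hrow : ∀ j < N.toNat + 1, get2 arr (d : Int) (j : Int) = markV A N.toNat d j)
    (k : Nat) (hk : k ≤ N.toNat) :
    Shape ((PySem.List.pyRange 1 ((k : Int)+1) 1).foldl
        (fun arr i => set2 arr (d : Int) i (get2 arr (d : Int) i + get2 arr (d : Int) (i-1))) arr)
      (DnA A) (N.toNat + 1) ∧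
    (∀ d' < DnA A, d' ≠ d → ∀ j < N.toNat + 1,
      get2 ((PySem.List.pyRange 1 ((k : Int)+1) 1).foldl
        (fun arr i => set2 arr (d : Int) i (get2 arr (d : Int) i + get2 arr (d : Int) (i-1))) arr)
        (d' : Int) (j : Int) = get2 arr (d' : Int) (j : Int)) ∧
    (∀ j < N.toNat + 1,
      get2 ((PySem.List.pyRange 1 ((k : Int)+1) 1).foldl
        (fun arr i => set2 arr (d : Int) i (get2 arr (d : Int) i + get2 arr (d : Int) (i-1))) arr)
        (d : Int) (j : Int) = if j ≤ k then cntV A d j else markV A N.toNat d j) := by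
  induction k with
  | zero =>
      rw [show (((0:Nat) : Int)) + 1 = (1:Int) by norm_num]
      rw [PySem.List.pyRange_one_eq_nil (le_refl 1)]
      simp only [List.foldl_nil]
      refine ⟨hs, fun d' _ _ j hj => trivial, ?_⟩
      intro j hj
      by_cases hj0 : j ≤ 0
      · rw [if_pos hj0]
        have hj00 : j = 0 := by omega
        subst hj00
        rw [hrow 0 (by omega), cnt_zero]
        unfold markV
        rw [if_neg (by omega)]
      · rw [if_neg hj0]
        exact hrow j hj
  | succ k ihk =>
      obtain ⟨iS, iO, iR⟩ := ihk (by omega)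
      have hsplit : PySem.List.pyRange 1 (((k+1 : Nat) : Int) + 1) 1
          = PySem.List.pyRange 1 (((k : Nat) : Int) + 1) 1 ++ [((k : Nat) : Int) + 1] := by
        have hc : ((k+1 : Nat) : Int) + 1 = ((((k : Nat) : Int) + 1)) + 1 := by push_cast; ring
        rw [hc]
        exact PySem.List.pyRange_one_succ_right (by omega)
      rw [hsplit, List.foldl_append]
      simp only [List.foldl_cons, List.foldl_nil]
      set F := (PySem.List.pyRange 1 (((k : Nat) : Int) + 1) 1).foldl
        (fun arr i => set2 arr (d : Int) i (get2 arr (d : Int) i + get2 arr (d : Int) (i-1))) arr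
        with hF
      have hc2 : (((k : Nat) : Int) + 1) - 1 = ((k : Nat) : Int) := by ring
      rw [hc2]
      have hc1 : ((k : Nat) : Int) + 1 = ((k+1 : Nat) : Int) := by push_cast; ring
      rw [hc1]
      have hv1 : get2 F (d : Int) ((k+1 : Nat) : Int) = markV A N.toNat d (k+1) := by
        rw [iR (k+1) (by omega), if_neg (by omega)]
      have hv2 : get2 F (d : Int) ((k : Nat) : Int) = cntV A d k := by
        rw [iR k (by omega), if_pos (le_refl k)]
      rw [hv1, hv2]
      have hval : markV A N.toNat d (k+1) + cntV A d k = cntV A d (k+1) := by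
        rw [cnt_succ N A hNA d k (by omega)]
        ring
      rw [hval]
      refine ⟨shape_set2 iS hd (k+1) _, ?_, ?_⟩
      · intro d' hd' hne j hj
        rw [get2_set2 iS hd (by omega) hd' hj _, if_neg (by tauto), iO d' hd' hne j hj]
      · intro j hj
        rw [get2_set2 iS hd (by omega) hd hj _]
        by_cases hjk : j = k+1
        · subst hjk
          rw [if_pos ⟨rfl, rfl⟩, if_pos (by omega)]
        · rw [if_neg (by tauto), iR j hj]
          by_cases hjk2 : j ≤ k
          · rw [if_pos hjk2, if_pos (by omega)]
          · rw [if_neg hjk2, if_neg (by omega)]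
lemma table (N : Int) (A : List Int) (hN : 0 ≤ N) (hNA : N ≤ (A.length : Int)) :
    ∀ d < DnA A, ∀ j ≤ N.toNat,
      get2 (arr2A N A) (d : Int) (j : Int) = cntV A d j := by
  have harr1 := arr1_spec N A hN hNA
  have H : ∀ g : Nat, g ≤ DnA A →
      Shape ((PySem.List.pyRange 0 (g : Int) 1).foldl (fun arr d =>
        (PySem.List.pyRange 1 (N+1) 1).foldl
          (fun arr i => set2 arr d i (get2 arr d i + get2 arr d (i-1))) arr) (arr1A N A))
        (DnA A) (N.toNat + 1)
      ∧ ∀ d < DnA A, ∀ j < N.toNat + 1,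
        get2 ((PySem.List.pyRange 0 (g : Int) 1).foldl (fun arr d =>
          (PySem.List.pyRange 1 (N+1) 1).foldl
            (fun arr i => set2 arr d i (get2 arr d i + get2 arr d (i-1))) arr) (arr1A N A))
          (d : Int) (j : Int)
        = if d < g then cntV A d j else markV A N.toNat d j := by
    intro g
    induction g with
    | zero =>
        intro _
        rw [PySem.List.pyRange_one_eq_nil (a := 0) (b := ((0:Nat):Int)) (by simp)]
        simp only [List.foldl_nil]
        refine ⟨harr1.1, fun d hd j hj => ?_⟩
        rw [harr1.2 d hd j hj, if_neg (by omega)]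
    | succ g ihg =>
        intro hg1
        obtain ⟨iS, iG⟩ := ihg (by omega)
        have hsplit : PySem.List.pyRange 0 ((g+1 : Nat) : Int) 1
            = PySem.List.pyRange 0 ((g : Nat) : Int) 1 ++ [((g : Nat) : Int)] := by
          push_cast
          exact PySem.List.pyRange_one_succ_right (by exact_mod_cast Nat.zero_le g)
        rw [hsplit, List.foldl_append]
        simp only [List.foldl_cons, List.foldl_nil]
        have hNrange : PySem.List.pyRange 1 (N+1) 1
            = PySem.List.pyRange 1 ((N.toNat : Int) + 1) 1 := by
          congr 1
          omega
        rw [hNrange] at iS iG ⊢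
        have hrowg : ∀ j < N.toNat + 1,
            get2 ((PySem.List.pyRange 0 (g : Int) 1).foldl (fun arr d =>
              (PySem.List.pyRange 1 ((N.toNat : Int) + 1) 1).foldl
                (fun arr i => set2 arr d i (get2 arr d i + get2 arr d (i-1))) arr) (arr1A N A))
              (g : Int) (j : Int) = markV A N.toNat g j := by
          intro j hj
          rw [iG g (by omega) j hj, if_neg (by omega)]
        obtain ⟨pS, pO, pR⟩ :=
          prefix_fold N A hN iS (by omega : g < DnA A) hNA hrowg N.toNat (le_refl _)
        refine ⟨pS, ?_⟩
        intro d hd j hj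
        by_cases hdg : d = g
        · subst hdg
          rw [pR j hj, if_pos (by omega : j ≤ N.toNat), if_pos (by omega : d < d+1)]
        · rw [pO d hd hdg j hj, iG d hd j hj]
          by_cases hdlt : d < g
          · rw [if_pos hdlt, if_pos (by omega)]
          · rw [if_neg hdlt, if_neg (by omega)]
  intro d hd j hj
  have hfin := (H (DnA A) (le_refl _)).2 d hd j (by omega)
  rw [if_pos hd] at hfin
  unfold arr2A
  exact hfin
-- ---------- the window predicate on A's side ----------
lemma cnt_sub (A : List Int) (d : Nat) (a b : Nat) (hab : a ≤ b) :
    cntV A d b - cntV A d a = (((A.drop a).take (b - a)).count ((vsA A).getD d 0) : Int) := by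
  unfold cntV
  have e : List.take b A = List.take a A ++ List.take (b - a) (List.drop a A) := by
    rw [← List.take_add]
    congr 1
    omega
  rw [e, List.count_append]
  push_cast
  ring
lemma pwin_iff_all (N : Int) (A : List Int) (hN : 0 ≤ N) (hNA : N ≤ (A.length : Int))
    (h l : Nat) (hw : l + 2*h ≤ N.toNat) :
    Pwin A h l ↔ (∀ d < DnA A,
      cntV A d (l+h) - cntV A d l = cntV A d (l+2*h) - cntV A d (l+h)) := by
  constructor
  · intro hP d hd
    rw [cnt_sub A d l (l+h) (by omega), cnt_sub A d (l+h) (l+2*h) (by omega)]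
    have e1 : l + h - l = h := by omega
    have e2 : l + 2*h - (l+h) = h := by omega
    rw [e1, e2]
    exact_mod_cast hP ((vsA A).getD d 0)
  · intro hD v
    by_cases hv : v ∈ A
    · have hlt := idxOf_lt A hv
      have hthis := hD _ hlt
      rw [cnt_sub A _ l (l+h) (by omega), cnt_sub A _ (l+h) (l+2*h) (by omega)] at hthis
      have e1 : l + h - l = h := by omega
      have e2 : l + 2*h - (l+h) = h := by omega
      rw [e1, e2] at hthis
      have hgv : (vsA A).getD ((vsA A).idxOf v) 0 = v := by
        unfold DnA at hlt
        rw [List.getD_eq_getElem _ 0 hlt]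
        exact List.getElem_idxOf hlt
      rw [hgv] at hthis
      exact_mod_cast hthis
    · have h1 : ((A.drop l).take h).count v = 0 :=
        List.count_eq_zero.mpr (fun hm => hv (List.mem_of_mem_drop (List.mem_of_mem_take hm)))
      have h2 : ((A.drop (l+h)).take h).count v = 0 :=
        List.count_eq_zero.mpr (fun hm => hv (List.mem_of_mem_drop (List.mem_of_mem_take hm)))
      rw [h1, h2]
lemma innerA_main (N : Int) (A : List Int) (hN : 0 ≤ N) (hNA : N ≤ (A.length : Int))
    (h : Nat) (hh : 1 ≤ h) (hW : 2*h ≤ N.toNat) :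
    ∀ (n l0 : Nat), N.toNat + 1 - l0 = n →
    ((∃ l, l0 ≤ l ∧ l + 2*h ≤ N.toNat ∧ Pwin A h l) →
      innerA (arr2A N A) ((DnA A : Int)) ((2*h : Nat) : Int)
        (PySem.List.pyRange (l0 : Int) (N - ((2*h : Nat) : Int) + 1) 1) = some ((2*h : Nat) : Int)) ∧
    ((¬ ∃ l, l0 ≤ l ∧ l + 2*h ≤ N.toNat ∧ Pwin A h l) →
      innerA (arr2A N A) ((DnA A : Int)) ((2*h : Nat) : Int)
        (PySem.List.pyRange (l0 : Int) (N - ((2*h : Nat) : Int) + 1) 1) = none) := by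
  intro n
  induction n with
  | zero =>
      intro l0 hn
      have hnil : PySem.List.pyRange (l0 : Int) (N - ((2*h : Nat) : Int) + 1) 1 = [] :=
        PySem.List.pyRange_one_eq_nil (by push_cast; omega)
      rw [hnil]
      refine ⟨fun hE => ?_, fun _ => rfl⟩
      obtain ⟨l, h1, h2, _⟩ := hE
      omega
  | succ n ih =>
      intro l0 hn
      by_cases hend : l0 + 2*h ≤ N.toNat
      · have hcons : PySem.List.pyRange (l0 : Int) (N - ((2*h : Nat) : Int) + 1) 1
            = (l0 : Int) :: PySem.List.pyRange ((l0 : Int) + 1) (N - ((2*h : Nat) : Int) + 1) 1 :=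
          PySem.List.pyRange_one_cons (by push_cast; omega)
        rw [hcons]
        simp only [innerA]
        have hm : PySem.Int.floordiv ((l0:Int) + ((l0:Int) + ((2*h : Nat):Int) - 1)) 2 + 1
            = ((l0 + h : Nat) : Int) := by
          rw [PySem.Int.floordiv_eq_ediv_of_pos (by norm_num)]
          push_cast
          omega
        have hr1 : ((l0:Int) + ((2*h : Nat):Int) - 1) + 1 = ((l0 + 2*h : Nat) : Int) := by
          push_cast
          ring
        rw [hm, hr1]
        have hflag : ((PySem.List.pyRange 0 ((DnA A : Int)) 1).all (fun dd =>
            get2 (arr2A N A) dd ((l0 + h : Nat) : Int) - get2 (arr2A N A) dd ((l0 : Nat) : Int)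
            == get2 (arr2A N A) dd ((l0 + 2*h : Nat) : Int)
              - get2 (arr2A N A) dd ((l0 + h : Nat) : Int)) = true)
            ↔ Pwin A h l0 := by
          rw [List.all_eq_true, pwin_iff_all N A hN hNA h l0 (by omega)]
          constructor
          · intro hall dd hdd
            have hmem : ((dd : Nat) : Int) ∈ PySem.List.pyRange 0 ((DnA A : Int)) 1 := by
              rw [PySem.List.mem_pyRange_one]
              constructor
              · omega
              · exact_mod_cast hdd
            have hb := hall _ hmem
            simp only [beq_iff_eq] at hb
            rw [table N A hN hNA dd hdd (l0+h) (by omega), table N A hN hNA dd hdd l0 (by omega),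
              table N A hN hNA dd hdd (l0+2*h) (by omega)] at hb
            exact hb
          · intro hP x hxmem
            rw [PySem.List.mem_pyRange_one] at hxmem
            obtain ⟨hx0, hxD⟩ := hxmem
            have hxn : x = ((x.toNat : Nat) : Int) := by omega
            simp only [beq_iff_eq]
            rw [hxn, table N A hN hNA x.toNat (by omega) (l0+h) (by omega),
              table N A hN hNA x.toNat (by omega) l0 (by omega),
              table N A hN hNA x.toNat (by omega) (l0+2*h) (by omega)]
            exact hP x.toNat (by omega)
        by_cases hP : Pwin A h l0
        · rw [if_pos (hflag.mpr hP)]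
          exact ⟨fun _ => rfl, fun hNE => absurd ⟨l0, le_refl _, by omega, hP⟩ hNE⟩
        · rw [if_neg (fun hf => hP (hflag.mp hf))]
          have hc1 : (l0 : Int) + 1 = ((l0 + 1 : Nat) : Int) := by push_cast; ring
          rw [hc1]
          have IH := ih (l0+1) (by omega)
          refine ⟨fun hE => ?_, fun hNE => ?_⟩
          · obtain ⟨l, h1, h2, h3⟩ := hE
            refine IH.1 ⟨l, ?_, h2, h3⟩
            have hne : l ≠ l0 := fun hEq => hP (hEq ▸ h3)
            omega
          · refine IH.2 (fun hE2 => ?_)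
            obtain ⟨l, h1, h2, h3⟩ := hE2
            exact hNE ⟨l, by omega, h2, h3⟩
      · have hnil : PySem.List.pyRange (l0 : Int) (N - ((2*h : Nat) : Int) + 1) 1 = [] :=
          PySem.List.pyRange_one_eq_nil (by push_cast; omega)
        rw [hnil]
        refine ⟨fun hE => ?_, fun _ => rfl⟩
        obtain ⟨l, h1, h2, _⟩ := hE
        omega

lemma innerA_some (N : Int) (A : List Int) (hN : 0 ≤ N) (hNA : N ≤ (A.length : Int))
    (h : Nat) (hh : 1 ≤ h) (hW : 2*h ≤ N.toNat) (l0 : Nat)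
    (hE : ∃ l, l0 ≤ l ∧ l + 2*h ≤ N.toNat ∧ Pwin A h l) :
    innerA (arr2A N A) ((DnA A : Int)) ((2*h : Nat) : Int)
      (PySem.List.pyRange (l0 : Int) (N - ((2*h : Nat) : Int) + 1) 1) = some ((2*h : Nat) : Int) := by
  exact (innerA_main N A hN hNA h hh hW (N.toNat + 1 - l0) l0 rfl).1 hE
lemma innerA_none (N : Int) (A : List Int) (hN : 0 ≤ N) (hNA : N ≤ (A.length : Int))
    (h : Nat) (hh : 1 ≤ h) (hW : 2*h ≤ N.toNat) (l0 : Nat)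
    (hE : ¬ ∃ l, l0 ≤ l ∧ l + 2*h ≤ N.toNat ∧ Pwin A h l) :
    innerA (arr2A N A) ((DnA A : Int)) ((2*h : Nat) : Int)
      (PySem.List.pyRange (l0 : Int) (N - ((2*h : Nat) : Int) + 1) 1) = none := by
  exact (innerA_main N A hN hNA h hh hW (N.toNat + 1 - l0) l0 rfl).2 hE

-- ---------- B side: the diff-dict invariant ----------
def InvD (d : PySem.Dict Int Int) (f : Int → Int) : Prop :=
  (∀ v, d.getD v 0 = f v) ∧ (∀ p ∈ d.items, p.2 ≠ 0) ∧ d.keys.Nodup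

lemma get?_erase (d : PySem.Dict Int Int) (k k' : Int) :
    (d.erase k).get? k' = if k' = k then none else d.get? k' := by
  rcases d with ⟨l⟩
  simp only [PySem.Dict.erase, PySem.Dict.get?]
  induction l with
  | nil => by_cases h : k' = k <;> simp [h]
  | cons p l ih =>
      by_cases hpk : p.1 = k
      · rw [List.filter_cons, if_neg (by simp [hpk])]
        by_cases hkk : k' = k
        · rw [ih, if_pos hkk, if_pos hkk]
        · rw [ih, if_neg hkk, if_neg hkk,
            List.find?_cons_of_neg (by simp [hpk]; exact fun hE => hkk hE.symm)]
      · rw [List.filter_cons, if_pos (by simp [hpk])]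
        by_cases hpk' : p.1 = k'
        · rw [List.find?_cons_of_pos (by simp [hpk']), List.find?_cons_of_pos (by simp [hpk'])]
          rw [if_neg (fun hE => hpk (hpk'.trans hE))]
        · rw [List.find?_cons_of_neg (by simp [hpk']), List.find?_cons_of_neg (by simp [hpk'])]
          exact ih
lemma keys_erase_nodup (d : PySem.Dict Int Int) (k : Int) (h : d.keys.Nodup) :
    (d.erase k).keys.Nodup := by
  rcases d with ⟨l⟩
  simp only [PySem.Dict.erase, PySem.Dict.keys, PySem.Dict.items] at h ⊢
  exact (List.Sublist.map Prod.fst List.filter_sublist).nodup h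
lemma invD_congr {d : PySem.Dict Int Int} {f g : Int → Int}
    (hd : InvD d f) (hfg : ∀ v, f v = g v) : InvD d g := by
  refine ⟨fun v => (hd.1 v).trans (hfg v), hd.2.1, hd.2.2⟩
lemma invD_empty : InvD (PySem.Dict.empty (κ := Int) (ν := Int)) (fun _ => 0) := by
  refine ⟨fun v => PySem.Dict.getD_empty v 0, ?_, ?_⟩
  · intro p hp; simp [PySem.Dict.empty] at hp
  · simp [PySem.Dict.empty, PySem.Dict.keys]
lemma mem_items_erase {d : PySem.Dict Int Int} {k : Int} {p : Int × Int}
    (hp : p ∈ (d.erase k).items) : p ∈ d.items := by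
  rcases d with ⟨l⟩
  exact List.mem_of_mem_filter hp

lemma invD_bump {d : PySem.Dict Int Int} {f : Int → Int} (hd : InvD d f) (v δ : Int) :
    InvD (bumpB d v δ) (fun w => if w = v then f v + δ else f w) := by
  have hg : d.getD v 0 = f v := hd.1 v
  simp only [bumpB, hg]
  by_cases hc : f v + δ ≠ 0
  · rw [if_pos hc]
    refine ⟨?_, ?_, PySem.Dict.nodup_keys_insert d v (f v + δ) hd.2.2⟩
    · intro w
      rw [PySem.Dict.getD_insert]
      by_cases hw : w = v <;> simp [hw, hd.1 w]
    · intro p hp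
      rcases (PySem.Dict.mem_items_insert d v (f v + δ) p).mp hp with rfl | ⟨hp', _⟩
      · simpa using hc
      · exact hd.2.1 p hp'
  · rw [if_neg hc]
    push_neg at hc
    refine ⟨?_, ?_, keys_erase_nodup d v hd.2.2⟩
    · intro w
      rw [PySem.Dict.getD_eq_get?_getD, get?_erase]
      by_cases hw : w = v
      · subst hw
        simp [hc]
      · rw [if_neg hw]
        show (d.get? w).getD 0 = if w = v then f v + δ else f w
        rw [if_neg hw, ← PySem.Dict.getD_eq_get?_getD]
        exact hd.1 w
    · intro p hp
      exact hd.2.1 p (mem_items_erase hp)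
lemma invD_bump_add {d : PySem.Dict Int Int} {f : Int → Int} (hd : InvD d f) (v δ : Int) :
    InvD (bumpB d v δ) (fun w => f w + if w = v then δ else 0) := by
  refine invD_congr (invD_bump hd v δ) ?_
  intro w
  by_cases hw : w = v
  · subst hw
    simp
  · simp [hw]

lemma invD_items_nil {d : PySem.Dict Int Int} {f : Int → Int} (hd : InvD d f) :
    d.items = [] ↔ ∀ v, f v = 0 := by
  constructor
  · intro hnil v
    rw [← hd.1 v]
    rcases d with ⟨l⟩
    simp only [PySem.Dict.items] at hnil
    subst hnil
    simp [PySem.Dict.getD, PySem.Dict.get?]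
  · intro hz
    cases hit : d.items with
    | nil => rfl
    | cons p ps =>
        exfalso
        have hmem : (p.1, p.2) ∈ d.items := by rw [hit]; simp
        have := PySem.Dict.getD_of_mem_items d hmem hd.2.2 0
        rw [hd.1 p.1] at this
        have hz' := hz p.1
        have hne := hd.2.1 p (by rw [hit]; simp)
        omega
lemma invD_fold_bump {d : PySem.Dict Int Int} {f : Int → Int} (hd : InvD d f)
    (xs : List Int) (δ : Int) :
    InvD (xs.foldl (fun d x => bumpB d x δ) d) (fun v => f v + δ * (xs.count v : Int)) := by
  induction xs generalizing d f with
  | nil => exact invD_congr hd (by simp)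
  | cons x xs ih =>
      simp only [List.foldl_cons]
      refine invD_congr (ih (invD_bump hd x δ)) ?_
      intro v
      by_cases hv : v = x
      · subst hv
        simp only [if_pos rfl, List.count_cons, BEq.rfl, if_pos]
        push_cast
        ring
      · have hb : (x == v) = false := beq_eq_false_iff_ne.mpr (fun hE => hv hE.symm)
        simp [List.count_cons, hb, hv]

-- ---------- loops over ranges of A-indices are loops over slices ----------
lemma foldl_pyRange_take {β : Type} (A : List Int) (g : β → Int → β) (a b : Nat)
    (hab : a ≤ b) (hb : b ≤ A.length) (d0 : β) :
    (PySem.List.pyRange (a : Int) (b : Int) 1).foldl (fun d k => g d (PySem.List.pyGetD A k 0)) d0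
      = ((A.drop a).take (b - a)).foldl g d0 := by
  revert hb
  induction b, hab using Nat.le_induction with
  | base =>
      intro _
      rw [PySem.List.pyRange_one_eq_nil (le_refl _)]
      simp
  | succ b hab ih =>
      intro hb1
      have hb' : b < A.length := by omega
      have hrange : PySem.List.pyRange (a : Int) ((b+1 : Nat) : Int) 1
          = PySem.List.pyRange (a : Int) (b : Int) 1 ++ [(b : Int)] := by
        push_cast
        exact PySem.List.pyRange_one_succ_right (by exact_mod_cast hab)
      have htake : (A.drop a).take (b + 1 - a) = (A.drop a).take (b - a) ++ [A.getD b 0] := by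
        have h0 : b + 1 - a = (b - a) + 1 := by omega
        rw [h0, List.take_succ, List.getElem?_drop,
          List.getElem?_eq_getElem (by omega : a + (b - a) < A.length)]
        have h2 : a + (b - a) = b := by omega
        simp only [h2]
        rw [List.getD_eq_getElem A 0 hb']
        simp
      rw [hrange, htake, List.foldl_append, List.foldl_append, ih (by omega)]
      simp [PySem.List.pyGetD_natCast]
lemma foldl_pyRange_take' {β : Type} (A : List Int) (g : β → Int → β) (a b : Int)
    (h0 : 0 ≤ a) (hab : a ≤ b) (hb : b ≤ (A.length : Int)) (d0 : β) :
    (PySem.List.pyRange a b 1).foldl (fun d k => g d (PySem.List.pyGetD A k 0)) d0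
      = ((A.drop a.toNat).take (b.toNat - a.toNat)).foldl g d0 := by
  obtain ⟨a', rfl⟩ : ∃ n : Nat, a = (n : Int) := ⟨a.toNat, by omega⟩
  obtain ⟨b', rfl⟩ : ∃ n : Nat, b = (n : Int) := ⟨b.toNat, by omega⟩
  simp only [Int.toNat_natCast]
  exact foldl_pyRange_take A g a' b' (by exact_mod_cast hab) (by exact_mod_cast hb) d0

lemma build_spec (N : Int) (A : List Int) (hNA : N ≤ (A.length : Int)) (h : Nat)
    (hW : 2*h ≤ N.toNat) (hN : 0 ≤ N) :
    InvD (buildB A (h : Int) ((2*h : Nat) : Int)) (wdiffV A h 0) := by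
  have hlen : N.toNat ≤ A.length := by omega
  unfold buildB
  rw [foldl_pyRange_take' A (fun d x => bumpB d x 1) 0 ((h:Nat):Int) (by omega)
      (by exact_mod_cast Nat.zero_le h) (by exact_mod_cast (by omega : h ≤ A.length)) _,
    foldl_pyRange_take' A (fun d x => bumpB d x (-1)) ((h:Nat):Int) (((2*h : Nat) : Nat):Int)
      (by exact_mod_cast Nat.zero_le h) (by exact_mod_cast (by omega : h ≤ 2*h))
      (by exact_mod_cast (by omega : 2*h ≤ A.length)) _]
  simp only [Int.toNat_natCast, Int.toNat_zero, List.drop_zero, Nat.sub_zero]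
  have e1 : 2*h - h = h := by omega
  rw [e1]
  have h1 := invD_fold_bump invD_empty (A.take h) 1
  have h2 := invD_fold_bump h1 ((A.drop h).take h) (-1)
  refine invD_congr h2 ?_
  intro v
  unfold wdiffV
  simp only [List.drop_zero, Nat.zero_add]
  ring

-- ---------- sliding the window ----------
lemma count_window_shift (A : List Int) (h l : Nat) (hh : 1 ≤ h) (hl : 1 ≤ l)
    (hend : l + h ≤ A.length) (v : Int) :
    (((A.drop l).take h).count v : Int)
      = (((A.drop (l-1)).take h).count v : Int)
        - (if A.getD (l-1) 0 = v then 1 else 0) + (if A.getD (l-1+h) 0 = v then 1 else 0) := by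
  have hl1 : l - 1 < A.length := by omega
  have e1 : A.drop (l-1) = A.getD (l-1) 0 :: A.drop l := by
    rw [List.getD_eq_getElem A 0 hl1, List.drop_eq_getElem_cons hl1]
    have : l - 1 + 1 = l := by omega
    rw [this]
  have e2 : (A.drop (l-1)).take h = A.getD (l-1) 0 :: (A.drop l).take (h-1) := by
    have h1 : (A.drop (l-1)).take h = (A.drop (l-1)).take ((h-1)+1) := by congr 1; omega
    rw [h1, e1, List.take_succ_cons]
  have e3 : (A.drop l).take h = (A.drop l).take (h-1) ++ [A.getD (l-1+h) 0] := by
    have hidx : l + (h - 1) < A.length := by omega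
    have h1 : (A.drop l).take h = (A.drop l).take ((h-1)+1) := by congr 1; omega
    rw [h1, List.take_succ, List.getElem?_drop, List.getElem?_eq_getElem hidx]
    have h2 : l + (h - 1) = l - 1 + h := by omega
    simp only [h2]
    rw [List.getD_eq_getElem A 0 (by omega)]
    simp
  rw [e2, e3]
  simp only [List.count_append, List.count_cons, List.count_nil, List.count_singleton]
  by_cases h1 : A.getD (l-1) 0 = v <;> by_cases h2 : A.getD (l-1+h) 0 = v <;>
    simp [h1, h2] <;> push_cast <;> omega
lemma wdiff_shift (A : List Int) (h l : Nat) (hh : 1 ≤ h) (hl : 1 ≤ l)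
    (hend : l + 2*h ≤ A.length) (v : Int) :
    wdiffV A h l v = wdiffV A h (l-1) v
      - (if A.getD (l-1) 0 = v then 1 else 0)
      + 2 * (if A.getD (l-1+h) 0 = v then 1 else 0)
      - (if A.getD (l-1+2*h) 0 = v then 1 else 0) := by
  have hL := count_window_shift A h l hh hl (by omega) v
  have hR := count_window_shift A h (l+h) hh (by omega) (by omega) v
  have e1 : l + h - 1 = l - 1 + h := by omega
  rw [e1] at hR
  have e2 : l - 1 + h + h = l - 1 + 2*h := by omega
  rw [e2] at hR
  unfold wdiffV
  rw [hL, hR]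
  by_cases h1 : A.getD (l-1) 0 = v <;> by_cases h2 : A.getD (l-1+h) 0 = v <;>
    by_cases h3 : A.getD (l-1+2*h) 0 = v <;> simp [h1, h2, h3] <;> omega
lemma pwin_iff_wdiff (A : List Int) (h l : Nat) :
    Pwin A h l ↔ ∀ v, wdiffV A h l v = 0 := by
  unfold Pwin wdiffV
  constructor
  · intro H v; have := H v; omega
  · intro H v; have := H v; omega

lemma slideB_main (N : Int) (A : List Int) (hN : 0 ≤ N) (hNA : N ≤ (A.length : Int))
    (h : Nat) (hh : 1 ≤ h) (hW : 2*h ≤ N.toNat) :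
    ∀ (n l0 : Nat), 1 ≤ l0 → N.toNat + 1 - l0 = n →
    ∀ (d : PySem.Dict Int Int), InvD d (wdiffV A h (l0 - 1)) →
    ((∃ l, l0 ≤ l ∧ l + 2*h ≤ N.toNat ∧ Pwin A h l) →
      slideB A ((2*h : Nat) : Int) (h : Int)
        (PySem.List.pyRange (l0 : Int) (N - ((2*h : Nat) : Int) + 1) 1) d = some ((2*h : Nat) : Int)) ∧
    ((¬ ∃ l, l0 ≤ l ∧ l + 2*h ≤ N.toNat ∧ Pwin A h l) →
      slideB A ((2*h : Nat) : Int) (h : Int)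
        (PySem.List.pyRange (l0 : Int) (N - ((2*h : Nat) : Int) + 1) 1) d = none) := by
  intro n
  induction n with
  | zero =>
      intro l0 hl0 hn d hd
      have hnil : PySem.List.pyRange (l0 : Int) (N - ((2*h : Nat) : Int) + 1) 1 = [] :=
        PySem.List.pyRange_one_eq_nil (by push_cast; omega)
      rw [hnil]
      refine ⟨fun hE => ?_, fun _ => rfl⟩
      obtain ⟨l, h1, h2, _⟩ := hE
      omega
  | succ n ih =>
      intro l0 hl0 hn d hd
      by_cases hend : l0 + 2*h ≤ N.toNat
      · have hcons : PySem.List.pyRange (l0 : Int) (N - ((2*h : Nat) : Int) + 1) 1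
            = (l0 : Int) :: PySem.List.pyRange ((l0 : Int) + 1) (N - ((2*h : Nat) : Int) + 1) 1 :=
          PySem.List.pyRange_one_cons (by push_cast; omega)
        rw [hcons]
        simp only [slideB]
        have hA1 : PySem.List.pyGetD A ((l0:Int) - 1) 0 = A.getD (l0-1) 0 := by
          rw [show (l0:Int) - 1 = ((l0-1 : Nat) : Int) by omega, PySem.List.pyGetD_natCast]
        have hA2 : PySem.List.pyGetD A ((l0:Int) - 1 + (h : Int)) 0 = A.getD (l0-1+h) 0 := by
          rw [show (l0:Int) - 1 + (h:Int) = ((l0-1+h : Nat) : Int) by push_cast; omega,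
            PySem.List.pyGetD_natCast]
        have hA3 : PySem.List.pyGetD A ((l0:Int) - 1 + ((2*h : Nat) : Int)) 0
            = A.getD (l0-1+2*h) 0 := by
          rw [show (l0:Int) - 1 + ((2*h:Nat):Int) = ((l0-1+2*h : Nat) : Int) by push_cast; omega,
            PySem.List.pyGetD_natCast]
        rw [hA1, hA2, hA3]
        have b1 := invD_bump_add hd (A.getD (l0-1) 0) (-1)
        have b2 := invD_bump_add b1 (A.getD (l0-1+h) 0) 2
        have b3 := invD_bump_add b2 (A.getD (l0-1+2*h) 0) (-1)
        have hinv : InvD (bumpB (bumpB (bumpB d (A.getD (l0-1) 0) (-1))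
            (A.getD (l0-1+h) 0) 2) (A.getD (l0-1+2*h) 0) (-1)) (wdiffV A h l0) := by
          refine invD_congr b3 ?_
          intro w
          rw [wdiff_shift A h l0 hh (by omega) (by omega) w]
          split_ifs <;> omega
        have hiff := invD_items_nil hinv
        by_cases hP : Pwin A h l0
        · rw [if_pos (hiff.mpr ((pwin_iff_wdiff A h l0).mp hP))]
          exact ⟨fun _ => rfl, fun hNE => absurd ⟨l0, le_refl _, by omega, hP⟩ hNE⟩
        · rw [if_neg (fun he => hP ((pwin_iff_wdiff A h l0).mpr (hiff.mp he)))]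
          have hc1 : (l0 : Int) + 1 = ((l0 + 1 : Nat) : Int) := by push_cast; ring
          rw [hc1]
          have IH := ih (l0+1) (by omega) (by omega) _ (by simpa using hinv)
          refine ⟨fun hE => ?_, fun hNE => ?_⟩
          · obtain ⟨l, h1, h2, h3⟩ := hE
            refine IH.1 ⟨l, ?_, h2, h3⟩
            have hne : l ≠ l0 := fun hEq => hP (hEq ▸ h3)
            omega
          · refine IH.2 (fun hE2 => ?_)
            obtain ⟨l, h1, h2, h3⟩ := hE2
            exact hNE ⟨l, by omega, h2, h3⟩
      · have hnil : PySem.List.pyRange (l0 : Int) (N - ((2*h : Nat) : Int) + 1) 1 = [] :=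
          PySem.List.pyRange_one_eq_nil (by push_cast; omega)
        rw [hnil]
        refine ⟨fun hE => ?_, fun _ => rfl⟩
        obtain ⟨l, h1, h2, _⟩ := hE
        omega

lemma slideB_some (N : Int) (A : List Int) (hN : 0 ≤ N) (hNA : N ≤ (A.length : Int))
    (h : Nat) (hh : 1 ≤ h) (hW : 2*h ≤ N.toNat) (l0 : Nat) (hl0 : 1 ≤ l0)
    {d : PySem.Dict Int Int} (hd : InvD d (wdiffV A h (l0 - 1)))
    (hE : ∃ l, l0 ≤ l ∧ l + 2*h ≤ N.toNat ∧ Pwin A h l) :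
    slideB A ((2*h : Nat) : Int) (h : Int)
      (PySem.List.pyRange (l0 : Int) (N - ((2*h : Nat) : Int) + 1) 1) d = some ((2*h : Nat) : Int) := by
  exact (slideB_main N A hN hNA h hh hW (N.toNat + 1 - l0) l0 hl0 rfl d hd).1 hE
lemma slideB_none (N : Int) (A : List Int) (hN : 0 ≤ N) (hNA : N ≤ (A.length : Int))
    (h : Nat) (hh : 1 ≤ h) (hW : 2*h ≤ N.toNat) (l0 : Nat) (hl0 : 1 ≤ l0)
    {d : PySem.Dict Int Int} (hd : InvD d (wdiffV A h (l0 - 1)))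
    (hE : ¬ ∃ l, l0 ≤ l ∧ l + 2*h ≤ N.toNat ∧ Pwin A h l) :
    slideB A ((2*h : Nat) : Int) (h : Int)
      (PySem.List.pyRange (l0 : Int) (N - ((2*h : Nat) : Int) + 1) 1) d = none := by
  exact (slideB_main N A hN hNA h hh hW (N.toNat + 1 - l0) l0 hl0 rfl d hd).2 hE

-- ---------- outer loop ----------
lemma outer_eq (N : Int) (A : List Int) (hN : 0 ≤ N) (hNA : N ≤ (A.length : Int))
    (is : List Int) (his : ∀ i ∈ is, 2 ≤ i ∧ i ≤ N ∧ 2 ∣ i) :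
    outerA N (arr2A N A) ((DnA A : Int)) is = outerB N A is := by
  induction is with
  | nil => rfl
  | cons i is ihis =>
      obtain ⟨hi2, hiN, hidvd⟩ := his i (List.mem_cons_self)
      have hrec := ihis (fun x hx => his x (List.mem_cons_of_mem _ hx))
      have hi : i = ((2*(i.toNat/2) : Nat) : Int) := by omega
      set h : Nat := i.toNat / 2 with hhdef
      have hh1 : 1 ≤ h := by omega
      have hW : 2*h ≤ N.toNat := by omega
      simp only [outerA, outerB]
      have hflo : PySem.Int.floordiv i 2 = ((h : Nat) : Int) := by
        rw [PySem.Int.floordiv_eq_ediv_of_pos (by norm_num)]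
        omega
      rw [hflo, hi]
      have hbuild := build_spec N A hNA h hW hN
      by_cases hP0 : Pwin A h 0
      · have hempty : (buildB A ((h : Nat) : Int) ((2*h : Nat) : Int)).items = [] :=
          (invD_items_nil hbuild).mpr ((pwin_iff_wdiff A h 0).mp hP0)
        rw [if_pos hempty]
        have hsome := innerA_some N A hN hNA h hh1 hW 0 ⟨0, le_refl 0, by omega, hP0⟩
        rw [Nat.cast_zero] at hsome
        rw [hsome]
      · have hne : ¬ (buildB A ((h : Nat) : Int) ((2*h : Nat) : Int)).items = [] :=
          fun he => hP0 ((pwin_iff_wdiff A h 0).mpr ((invD_items_nil hbuild).mp he))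
        rw [if_neg hne]
        by_cases hE1 : ∃ l, 1 ≤ l ∧ l + 2*h ≤ N.toNat ∧ Pwin A h l
        · have hsB := slideB_some N A hN hNA h hh1 hW 1 (le_refl 1)
            (d := buildB A ((h : Nat) : Int) ((2*h : Nat) : Int)) (by simpa using hbuild) hE1
          rw [Nat.cast_one] at hsB
          rw [hsB]
          have hsA := innerA_some N A hN hNA h hh1 hW 0 (by
            obtain ⟨l, h1, h2, h3⟩ := hE1
            exact ⟨l, by omega, h2, h3⟩)
          rw [Nat.cast_zero] at hsA
          rw [hsA]
        · have hnB := slideB_none N A hN hNA h hh1 hW 1 (le_refl 1)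
            (d := buildB A ((h : Nat) : Int) ((2*h : Nat) : Int)) (by simpa using hbuild) hE1
          rw [Nat.cast_one] at hnB
          rw [hnB]
          have hnA := innerA_none N A hN hNA h hh1 hW 0 (by
            rintro ⟨l, h1, h2, h3⟩
            rcases Nat.eq_zero_or_pos l with rfl | hl
            · exact hP0 h3
            · exact hE1 ⟨l, by omega, h2, h3⟩)
          rw [Nat.cast_zero] at hnA
          rw [hnA]
          exact hrec

lemma start_props (N : Int) : startI N ≤ N ∧ 2 ∣ startI N := by
  unfold startI
  rcases PySem.Int.mod_two_eq N with h | h <;>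
    rw [PySem.Int.mod_eq_emod_of_pos (by norm_num)] at h
  · rw [if_pos (by rw [PySem.Int.mod_eq_emod_of_pos (by norm_num)]; exact h)]
    exact ⟨le_refl N, by omega⟩
  · rw [if_neg (by rw [PySem.Int.mod_eq_emod_of_pos (by norm_num)]; omega)]
    exact ⟨by omega, by omega⟩
lemma solve_eq_solve_alt (N : Int) (A : List Int) (hPre : Pre_solve N A) :
    solve N A = solve_alt N A := by
  unfold Pre_solve at hPre
  rw [solve_eq, solve_alt_eq]
  by_cases hN : 0 ≤ N
  · apply outer_eq N A hN hPre
    intro i hi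
    have hs := start_props N
    rw [PySem.List.mem_pyRange_iff_of_neg (by norm_num : (-2:Int) < 0)] at hi
    obtain ⟨h1, h2, h3⟩ := hi
    have h4 : (2:Int) ∣ i - startI N := (neg_dvd).mp h3
    have h5 := hs.1
    have h6 := hs.2
    refine ⟨by omega, by omega, by omega⟩
  · have hnil : PySem.List.pyRange (startI N) 1 (-2) = [] := by
      rw [List.eq_nil_iff_forall_not_mem]
      intro x hx
      rw [PySem.List.mem_pyRange_iff_of_neg (by norm_num : (-2:Int) < 0)] at hx
      have := (start_props N).1
      omega
    rw [hnil]
    rfl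

-- ===== VERDICT (by name: the statement is the Claim_ definition above) =====
theorem solve_spec : Claim_equal_solve := by
  intro N A _hD hPre
  unfold Spec_solve
  exact solve_eq_solve_alt N A hPre
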